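-- pv_equiv track=rewrite | github.com/mohsen-haddadi/Stuffs | NOT_GLOBAL_FUNCTIONS_Flush.py | Table_Flush_3_cards
-- ===== SOURCE A (Python) =====
-- def s(Card) :
--     if Card in ('A c','2 c','3 c','4 c','5 c','6 c','7 c','8 c','9 c','10 c','J c','Q c','K c') :
--         return "c"
--     if Card in ('A d','2 d','3 d','4 d','5 d','6 d','7 d','8 d','9 d','10 d','J d','Q d','K d') :
--         return "d"
--     if Card in ('A h','2 h','3 h','4 h','5 h','6 h','7 h','8 h','9 h','10 h','J h','Q h','K h') :
--         return "h"
--     if Card in ('A s','2 s','3 s','4 s','5 s','6 s','7 s','8 s','9 s','10 s','J s','Q s','K s') :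
--         return "s"
--
-- def Table_Flush_3_cards( List ) :
--
--     c = 0; d = 0; h = 0; sp = 0
--     for i in List :
--         if s(i) == "c" : c = c + 1
--         if s(i) == "d" : d = d + 1
--         if s(i) == "h" : h = h + 1
--         if s(i) == "s" : sp = sp + 1
--
--     if 3 in (c,d,h,sp) :
--         return True
--     return False
-- ===== SOURCE B (Python) =====
-- def s(Card) :
--     if Card in ('A c','2 c','3 c','4 c','5 c','6 c','7 c','8 c','9 c','10 c','J c','Q c','K c') :
--         return "c"
--     if Card in ('A d','2 d','3 d','4 d','5 d','6 d','7 d','8 d','9 d','10 d','J d','Q d','K d') :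
--         return "d"
--     if Card in ('A h','2 h','3 h','4 h','5 h','6 h','7 h','8 h','9 h','10 h','J h','Q h','K h') :
--         return "h"
--     if Card in ('A s','2 s','3 s','4 s','5 s','6 s','7 s','8 s','9 s','10 s','J s','Q s','K s') :
--         return "s"
--
-- def Table_Flush_3_cards( List ) :
--     # Partition algorithm: keep only recognized suits, then repeatedly split off
--     # the group of the first remaining suit; a flush-3 exists iff some group has size 3.
--     suits = [x for x in map(s, List) if x is not None]
--     while suits :
--         first = suits[0]
--         rest = [x for x in suits if x != first]
--         if len(suits) - len(rest) == 3 :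
--             return True
--         suits = rest
--     return False
-- ===== Notes on version B (the rewrite author's own statement) =====
-- stated objective: faster
-- what changed: Replaces A's single pass with four live per-suit accumulators (calling s(i) four times per card) by a partition algorithm: filter the recognized suits once (one s() call per card), then repeatedly split off the group of the first remaining suit and test whether that group has size 3 (at most four partition passes).
import Mathlib
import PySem

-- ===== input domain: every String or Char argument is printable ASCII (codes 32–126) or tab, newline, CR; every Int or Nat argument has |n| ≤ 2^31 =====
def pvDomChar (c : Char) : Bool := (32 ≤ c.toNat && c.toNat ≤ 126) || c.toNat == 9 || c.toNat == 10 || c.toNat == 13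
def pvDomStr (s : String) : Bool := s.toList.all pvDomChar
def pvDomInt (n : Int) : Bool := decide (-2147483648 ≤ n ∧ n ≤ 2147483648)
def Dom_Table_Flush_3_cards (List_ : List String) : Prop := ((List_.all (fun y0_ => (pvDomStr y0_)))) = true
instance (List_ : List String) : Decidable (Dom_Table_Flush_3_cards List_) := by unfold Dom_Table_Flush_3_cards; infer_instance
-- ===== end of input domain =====

-- B replaces A's four live per-suit counters by a partition algorithm (filter the recognized suits once, then repeatedly split off the first suit's group and test its size); a timing run measured B faster.

-- ===== PORT A =====
-- helper s: returns the suit letter, or none (Python None) for unrecognized cards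
def pvSuit (Card : String) : Option String :=
  if ["A c","2 c","3 c","4 c","5 c","6 c","7 c","8 c","9 c","10 c","J c","Q c","K c"].contains Card then some "c"
  else if ["A d","2 d","3 d","4 d","5 d","6 d","7 d","8 d","9 d","10 d","J d","Q d","K d"].contains Card then some "d"
  else if ["A h","2 h","3 h","4 h","5 h","6 h","7 h","8 h","9 h","10 h","J h","Q h","K h"].contains Card then some "h"
  else if ["A s","2 s","3 s","4 s","5 s","6 s","7 s","8 s","9 s","10 s","J s","Q s","K s"].contains Card then some "s"
  else none

def Table_Flush_3_cards (List_ : List String) : Bool :=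
  let st := List_.foldl (fun (st : Int × Int × Int × Int) i =>
    let st := if pvSuit i = some "c" then (st.1 + 1, st.2.1, st.2.2.1, st.2.2.2) else st
    let st := if pvSuit i = some "d" then (st.1, st.2.1 + 1, st.2.2.1, st.2.2.2) else st
    let st := if pvSuit i = some "h" then (st.1, st.2.1, st.2.2.1 + 1, st.2.2.2) else st
    let st := if pvSuit i = some "s" then (st.1, st.2.1, st.2.2.1, st.2.2.2 + 1) else st
    st) (0, 0, 0, 0)
  if st.1 = 3 ∨ st.2.1 = 3 ∨ st.2.2.1 = 3 ∨ st.2.2.2 = 3 then true else false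

-- ===== PORT B =====
-- B's while loop: split off the group of the first remaining suit, test its size, continue on the rest
def pvStrip : List String → Bool
  | [] => false
  | first :: tail =>
    let suits := first :: tail
    let rest := suits.filter (fun x => x ≠ first)
    if suits.length - rest.length == 3 then true
    else pvStrip rest
termination_by l => l.length
decreasing_by
  simp
  exact List.length_filter_le _ _

def Table_Flush_3_cards_alt (List_ : List String) : Bool :=
  -- suits = [x for x in map(s, List) if x is not None]
  let suits := (List_.map pvSuit).filterMap id
  pvStrip suits

-- ===== PRECONDITION & SPEC =====
def Spec_Table_Flush_3_cards (List_ : List String) (out : Bool) : Prop := out = Table_Flush_3_cards_alt List_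
instance (List_ : List String) (out : Bool) : Decidable (Spec_Table_Flush_3_cards List_ out) := by unfold Spec_Table_Flush_3_cards; infer_instance

-- ===== CLAIM (what is proved, stated in full; the proofs are below) =====
def Claim_equal_Table_Flush_3_cards : Prop := ∀ (List_ : List String), Dom_Table_Flush_3_cards List_ → Spec_Table_Flush_3_cards List_ (Table_Flush_3_cards List_)

-- ===== LEMMAS AND PROOFS =====

-- A's fold accumulates exactly the per-suit counts of the mapped suit list
theorem pv_fold_counts (List_ : List String) (c d h sp : Int) :
    List_.foldl (fun (st : Int × Int × Int × Int) i =>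
      let st := if pvSuit i = some "c" then (st.1 + 1, st.2.1, st.2.2.1, st.2.2.2) else st
      let st := if pvSuit i = some "d" then (st.1, st.2.1 + 1, st.2.2.1, st.2.2.2) else st
      let st := if pvSuit i = some "h" then (st.1, st.2.1, st.2.2.1 + 1, st.2.2.2) else st
      let st := if pvSuit i = some "s" then (st.1, st.2.1, st.2.2.1, st.2.2.2 + 1) else st
      st) (c, d, h, sp)
    = (c + (List_.map pvSuit).count (some "c"),
       d + (List_.map pvSuit).count (some "d"),
       h + (List_.map pvSuit).count (some "h"),
       sp + (List_.map pvSuit).count (some "s")) := by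
  induction List_ generalizing c d h sp with
  | nil => simp
  | cons x xs ih =>
    simp only [List.foldl_cons, List.map_cons, List.count_cons]
    by_cases hc : pvSuit x = some "c" <;>
    by_cases hd : pvSuit x = some "d" <;>
    by_cases hh : pvSuit x = some "h" <;>
    by_cases hs : pvSuit x = some "s" <;>
      simp_all <;> omega

-- stripping the first suit's group removes exactly count-many elements
theorem pv_len_sub_filter (first : String) (l : List String) :
    l.length - (l.filter (fun x => decide (x ≠ first))).length = l.count first := by
  induction l with
  | nil => simp
  | cons x xs ih =>
    have hle := List.length_filter_le (fun x => decide (x ≠ first)) xs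
    by_cases hx : x = first <;> simp_all [List.count_cons] <;> omega

theorem pv_count_filter_ne (first v : String) (l : List String) (h : v ≠ first) :
    (l.filter (fun x => decide (x ≠ first))).count v = l.count v := by
  induction l with
  | nil => simp
  | cons x xs ih =>
    have h' : ¬ first = v := fun he => h he.symm
    by_cases hx : x = first <;> simp_all [List.count_cons]

-- pvStrip decides "some element occurs exactly 3 times"
theorem pvStrip_iff (suits : List String) :
    pvStrip suits = true ↔ ∃ v, suits.count v = 3 := by
  fun_induction pvStrip suits with
  | case1 => simp
  | case2 first tail suits rest hcond =>
    simp only [suits, rest, beq_iff_eq, pv_len_sub_filter] at hcond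
    exact ⟨fun _ => ⟨first, hcond⟩, fun _ => rfl⟩
  | case3 first tail suits rest hcond ih =>
    simp only [suits, rest, beq_iff_eq, pv_len_sub_filter] at hcond
    simp only [suits, rest] at ih ⊢
    rw [ih]
    constructor
    · rintro ⟨v, hv⟩
      have hvne : v ≠ first := by
        intro he; subst he
        rw [List.count_eq_zero.mpr (by simp [List.mem_filter])] at hv
        exact absurd hv (by omega)
      rw [pv_count_filter_ne _ _ _ hvne] at hv
      exact ⟨v, hv⟩
    · rintro ⟨v, hv⟩
      have hvne : v ≠ first := by intro he; subst he; exact hcond hv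
      exact ⟨v, by rw [pv_count_filter_ne _ _ _ hvne]; exact hv⟩

theorem pvSuit_mem (x v : String) (h : pvSuit x = some v) :
    v = "c" ∨ v = "d" ∨ v = "h" ∨ v = "s" := by
  unfold pvSuit at h
  split_ifs at h <;> simp_all

theorem count_filterMap_suit (List_ : List String) (v : String) :
    ((List_.map pvSuit).filterMap id).count v = (List_.map pvSuit).count (some v) := by
  simp only [List.filterMap_map, Function.id_comp]
  induction List_ with
  | nil => simp
  | cons x xs ih =>
    cases h : pvSuit x <;> simp [List.filterMap_cons, List.count_cons, h, ih]

-- ===== VERDICT (by name: the statement is the Claim_ definition above) =====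
-- some value occurs 3 times in the filtered suit list iff one of the four suits does in the mapped list
theorem pv_exists_count_iff (List_ : List String) :
    (∃ v, ((List_.map pvSuit).filterMap id).count v = 3) ↔
      ((List_.map pvSuit).count (some "c") = 3 ∨ (List_.map pvSuit).count (some "d") = 3 ∨
       (List_.map pvSuit).count (some "h") = 3 ∨ (List_.map pvSuit).count (some "s") = 3) := by
  constructor
  · rintro ⟨v, hv⟩
    have hmem : v ∈ (List_.map pvSuit).filterMap id := by
      rw [← List.count_pos_iff]; omega
    rw [List.mem_filterMap] at hmem
    obtain ⟨o, ho, hido⟩ := hmem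
    rw [List.mem_map] at ho
    obtain ⟨x, _, hx⟩ := ho
    have hfour := pvSuit_mem x v (by rw [hx]; exact hido)
    rw [count_filterMap_suit] at hv
    rcases hfour with h|h|h|h <;> subst h <;> simp [hv]
  · rintro (h|h|h|h)
    · exact ⟨"c", by rw [count_filterMap_suit]; exact h⟩
    · exact ⟨"d", by rw [count_filterMap_suit]; exact h⟩
    · exact ⟨"h", by rw [count_filterMap_suit]; exact h⟩
    · exact ⟨"s", by rw [count_filterMap_suit]; exact h⟩

-- ===== VERDICT (by name: the statement is the Claim_ definition above) =====
theorem Table_Flush_3_cards_spec : Claim_equal_Table_Flush_3_cards := by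
  intro List_ _
  unfold Spec_Table_Flush_3_cards Table_Flush_3_cards Table_Flush_3_cards_alt
  rw [pv_fold_counts]
  simp only [zero_add]
  have h1 := pvStrip_iff ((List_.map pvSuit).filterMap id)
  have h2 := pv_exists_count_iff List_
  split_ifs with hA
  · refine (h1.mpr (h2.mpr ?_)).symm
    rcases hA with h|h|h|h
    · exact Or.inl (by exact_mod_cast h)
    · exact Or.inr (Or.inl (by exact_mod_cast h))
    · exact Or.inr (Or.inr (Or.inl (by exact_mod_cast h)))
    · exact Or.inr (Or.inr (Or.inr (by exact_mod_cast h)))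
  · have hne : pvStrip ((List_.map pvSuit).filterMap id) ≠ true := by
      intro ht
      rcases h2.mp (h1.mp ht) with h|h|h|h
      · exact hA (Or.inl (by exact_mod_cast h))
      · exact hA (Or.inr (Or.inl (by exact_mod_cast h)))
      · exact hA (Or.inr (Or.inr (Or.inl (by exact_mod_cast h))))
      · exact hA (Or.inr (Or.inr (Or.inr (by exact_mod_cast h))))
    simp only [Bool.not_eq_true] at hne
    exact hne.symm
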